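-- pv_equiv track=rewrite | github.com/edt-yxz-zzd/python3_src | nn_ns/math_nn/ops/IPowers.py | uint2iter_low_bin_uintsBE
-- ===== SOURCE A (Python) =====
-- def uint2bitstrLE(u):
--     assert u >= 0
--     return bin(u)[:1:-1]
--
-- def uint2two_expsLE(u):
--     # uint2two_expsLE u = [i | i <-[0..], 2^i & u != 0]
--     return [i for i, bit in enumerate(uint2bitstrLE(u)) if bit=='1']
--
-- def uint2iter_low_bin_uintsBE(u):
--     # u = 0b1001010 => iter [0b1001010,0b1010, 0b10, 0b0]
--     yield u
--     expsLE = uint2two_expsLE(u)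
--     one_lshifts = []
--     one_lshift = 1
--     pre_exp = 0
--     for exp in expsLE:
--         one_lshift <<= exp - pre_exp
--         one_lshifts.append(one_lshift)
--         pre_exp = exp
--     for one_lshift in one_lshifts:
--         u -= one_lshift
--         yield u
--     assert u == 0
-- ===== SOURCE B (Python) =====
-- def uint2iter_low_bin_uintsBE(u):
--     # single loop: clear the lowest set bit each step (u &= u-1); no bit-string/exponent lists
--     yield u
--     assert u >= 0
--     while u:
--         u &= u - 1
--         yield u
-- ===== Notes on version B (the rewrite author's own statement) =====
-- stated objective: simpler
-- what changed: Replaces the three-stage pipeline (binary string -> exponent list -> shifted-power list -> subtraction pass) with a single loop that clears the lowest set bit via u &= u-1, maintaining only u.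
import Mathlib
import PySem

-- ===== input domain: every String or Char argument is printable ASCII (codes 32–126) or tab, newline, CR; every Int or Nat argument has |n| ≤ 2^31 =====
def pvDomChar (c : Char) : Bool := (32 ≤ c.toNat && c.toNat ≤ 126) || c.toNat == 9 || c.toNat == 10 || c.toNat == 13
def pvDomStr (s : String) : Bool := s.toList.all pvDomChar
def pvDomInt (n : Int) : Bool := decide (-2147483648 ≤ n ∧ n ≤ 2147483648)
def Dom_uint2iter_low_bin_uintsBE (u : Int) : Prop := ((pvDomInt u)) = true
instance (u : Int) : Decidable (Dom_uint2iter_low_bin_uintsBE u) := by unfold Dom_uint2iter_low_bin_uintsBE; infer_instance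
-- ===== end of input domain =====

-- B replaces A's three-stage pipeline (bit string → exponent list → shifted-power list →
-- subtraction pass) with one loop clearing the lowest set bit (u &= u-1); objective: simpler.

-- ===== PORT A =====
-- hand port of bin(u)[:1:-1] for u ≥ 0: the binary digits of u, least significant first,
-- "0" for u = 0; exact on Pre_ (for u < 0 Python's `assert u >= 0` raises).
def bitsLE (n : Nat) : List Char :=
  if h : n = 0 then [] else (if n % 2 = 1 then '1' else '0') :: bitsLE (n / 2)
decreasing_by exact Nat.div_lt_self (Nat.pos_of_ne_zero h) one_lt_two

def uint2bitstrLE (u : Int) : List Char :=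
  if u.toNat = 0 then ['0'] else bitsLE u.toNat

def uint2two_expsLE (u : Int) : List Int :=
  ((PySem.List.enumerate (uint2bitstrLE u) 0).filter (fun p => p.2 == '1')).map (fun p => p.1)

def uint2iter_low_bin_uintsBE (u : Int) : List Int :=
  -- `one_lshift <<= exp - pre_exp`: the shift amount is always ≥ 0 (the exponents are
  -- increasing), so `.toNat` on it is exact.
  let expsLE := uint2two_expsLE u
  let st := expsLE.foldl (fun (st : List Int × Int × Int) exp =>
      let one_lshift := st.2.1 <<< (exp - st.2.2).toNat
      (st.1 ++ [one_lshift], one_lshift, exp)) ([], 1, 0)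
  let fin := st.1.foldl (fun (st : List Int × Int) one_lshift =>
      (st.1 ++ [st.2 - one_lshift], st.2 - one_lshift)) ([], u)
  u :: fin.1

-- ===== PORT B =====
-- the `while u: u &= u - 1; yield u` loop of Source B, run on u.toNat (exact for u ≥ 0)
def altGo (n : Nat) : List Int :=
  (n : Int) :: (if h : n = 0 then [] else altGo (n &&& (n - 1)))
decreasing_by
  exact Nat.lt_of_le_of_lt Nat.and_le_right (Nat.sub_lt (Nat.pos_of_ne_zero h) one_pos)

def uint2iter_low_bin_uintsBE_alt (u : Int) : List Int :=
  if u < 0 then [] else altGo u.toNat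

-- ===== PRECONDITION & SPEC =====
-- Pre_: A's `assert u >= 0` raises AssertionError on negative u (when the generator is resumed)
def Pre_uint2iter_low_bin_uintsBE (u : Int) : Prop := 0 ≤ u
instance (u : Int) : Decidable (Pre_uint2iter_low_bin_uintsBE u) := by
  unfold Pre_uint2iter_low_bin_uintsBE; infer_instance

def pvWitness_uint2iter_low_bin_uintsBE : Int := (74)

def Spec_uint2iter_low_bin_uintsBE (u : Int) (out : List Int) : Prop := out = uint2iter_low_bin_uintsBE_alt u
instance (u : Int) (out : List Int) : Decidable (Spec_uint2iter_low_bin_uintsBE u out) := by unfold Spec_uint2iter_low_bin_uintsBE; infer_instance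

-- ===== CLAIM (what is proved, stated in full; the proofs are below) =====
def Claim_equal_uint2iter_low_bin_uintsBE : Prop := ∀ (u : Int), Dom_uint2iter_low_bin_uintsBE u → Pre_uint2iter_low_bin_uintsBE u → Spec_uint2iter_low_bin_uintsBE u (uint2iter_low_bin_uintsBE u)

-- ===== LEMMAS AND PROOFS =====

-- the ascending list of set-bit positions of n
def expsOf (n : Nat) : List Nat :=
  if h : n = 0 then []
  else if n % 2 = 1 then 0 :: (expsOf (n / 2)).map (· + 1) else (expsOf (n / 2)).map (· + 1)
decreasing_by all_goals exact Nat.div_lt_self (Nat.pos_of_ne_zero h) one_lt_two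

-- the running values of A's subtraction loop
def partialSubs (v : Int) : List Int → List Int
  | [] => []
  | l :: ls => (v - l) :: partialSubs (v - l) ls

-- "p is a lower bound of es and es is ascending"
def LB : Nat → List Nat → Prop
  | _, [] => True
  | p, e :: es => p ≤ e ∧ LB e es

theorem expsOf_zero : expsOf 0 = [] := by rw [expsOf]; simp

theorem bitsLE_zero : bitsLE 0 = [] := by rw [bitsLE]; simp

-- A's comprehension over enumerate(bitstr) computes expsOf (shifted by the start index)
theorem filter_enum_bitsLE (n : Nat) : ∀ (i : Int),
    ((PySem.List.enumerate (bitsLE n) i).filter (fun p => p.2 == '1')).map (fun p => p.1)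
      = (expsOf n).map (fun e : Nat => (e : Int) + i) := by
  induction n using Nat.strong_induction_on with
  | _ n ih =>
    intro i
    by_cases h : n = 0
    · subst h; simp [bitsLE_zero, expsOf_zero ] 
    · rw [bitsLE, expsOf]; simp only [h, dite_false]
      have hlt : n / 2 < n := Nat.div_lt_self (Nat.pos_of_ne_zero h) one_lt_two
      by_cases hodd : n % 2 = 1
      · simp only [hodd, if_true, PySem.List.enumerate_cons, List.filter_cons]
        norm_num
        rw [ih (n / 2) hlt (i + 1)]
        apply List.map_congr_left; intro a _; simp [Function.comp]; ring
      · simp only [hodd, if_false, PySem.List.enumerate_cons, List.filter_cons]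
        norm_num
        rw [if_neg (by decide)]
        rw [ih (n / 2) hlt (i + 1)]
        apply List.map_congr_left; intro a _; simp [Function.comp]; ring

theorem exps_eq (u : Int) :
    uint2two_expsLE u = (expsOf u.toNat).map (fun e : Nat => (e : Int)) := by
  unfold uint2two_expsLE uint2bitstrLE
  by_cases h : u.toNat = 0
  · simp [h, expsOf_zero, PySem.List.enumerate_cons, PySem.List.enumerate]
  · simp only [h, if_false]
    rw [filter_enum_bitsLE u.toNat 0]
    simp

theorem LB_map_succ (p : Nat) (l : List Nat) (h : LB p l) : LB (p + 1) (l.map (· + 1)) := by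
  induction l generalizing p with
  | nil => trivial
  | cons a l ih => exact ⟨Nat.succ_le_succ h.1, ih a h.2⟩

theorem LB_mono (p q : Nat) (l : List Nat) (h : LB p l) (hq : q ≤ p) : LB q l := by
  cases l with
  | nil => trivial
  | cons a l => exact ⟨le_trans hq h.1, h.2⟩

theorem expsOf_LB (n : Nat) : LB 0 (expsOf n) := by
  induction n using Nat.strong_induction_on with
  | _ n ih =>
    by_cases h : n = 0
    · rw [h, expsOf_zero]; trivial
    · rw [expsOf]; simp only [h, dite_false]
      have hlt : n / 2 < n := Nat.div_lt_self (Nat.pos_of_ne_zero h) one_lt_two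
      have hc := LB_map_succ 0 _ (ih (n / 2) hlt)
      by_cases hodd : n % 2 = 1
      · simp only [hodd, if_true]
        exact ⟨le_refl 0, LB_mono 1 0 _ hc (by omega)⟩
      · simp only [hodd, if_false]
        exact LB_mono 1 0 _ hc (by omega)

-- the one_lshifts loop builds the powers 2^e, given an ascending exponent list
theorem fold1 (es : List Nat) : ∀ (p : Nat) (acc : List Int), LB p es →
    ((es.map (fun e : Nat => (e : Int))).foldl (fun (st : List Int × Int × Int) exp =>
        let one_lshift := st.2.1 <<< (exp - st.2.2).toNat
        (st.1 ++ [one_lshift], one_lshift, exp)) (acc, (2 : Int) ^ p, (p : Int))).1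
      = acc ++ es.map (fun e : Nat => (2 : Int) ^ e) := by
  induction es with
  | nil => intro p acc _; simp
  | cons e es ih =>
    intro p acc hch
    obtain ⟨hpe, hch⟩ := hch
    have hsh : ((2 : Int) ^ p) <<< (((e : Int)) - (p : Int)).toNat = (2 : Int) ^ e := by
      rw [Int.shiftLeft_eq]
      rw [show ((e : Int) - (p : Int)).toNat = e - p by omega]
      rw [← pow_add]
      congr 1; omega
    simp only [List.map_cons, List.foldl_cons]
    simp only [hsh]
    have := ih e (acc ++ [(2 : Int) ^ e]) hch
    simpa using this

-- the subtraction loop produces the partial differences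
theorem fold2 (ls : List Int) : ∀ (acc : List Int) (v : Int),
    (ls.foldl (fun (st : List Int × Int) l => (st.1 ++ [st.2 - l], st.2 - l)) (acc, v)).1
      = acc ++ partialSubs v ls := by
  induction ls with
  | nil => intro acc v; simp [partialSubs]
  | cons l ls ih =>
    intro acc v
    simp only [List.foldl_cons, partialSubs]
    rw [ih]
    simp

theorem and_pred_odd (k : Nat) (hk : k % 2 = 1) : k &&& (k - 1) = k - 1 := by
  apply Nat.eq_of_testBit_eq
  intro i
  rw [Nat.testBit_and]
  cases i with
  | zero =>
    simp only [Nat.testBit_zero]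
    have h2 : (k - 1) % 2 = 0 := by omega
    simp [hk, h2]
  | succ i =>
    simp only [Nat.testBit_add_one]
    rw [show (k - 1) / 2 = k / 2 by omega]
    simp

theorem and_pred_even (k : Nat) (hk : 0 < k) :
    (2 * k) &&& (2 * k - 1) = 2 * (k &&& (k - 1)) := by
  apply Nat.eq_of_testBit_eq
  intro i
  cases i with
  | zero =>
    rw [Nat.testBit_and]
    simp only [Nat.testBit_zero]
    have h1 : (2 * k) % 2 = 0 := by omega
    have h2 : (2 * (k &&& (k - 1))) % 2 = 0 := by omega
    simp [h1, h2]
  | succ i =>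
    rw [Nat.testBit_and]
    simp only [Nat.testBit_add_one]
    rw [← Nat.testBit_and]
    rw [show (2 * k) / 2 = k by omega, show (2 * k - 1) / 2 = k - 1 by omega,
        show (2 * (k &&& (k - 1))) / 2 = k &&& (k - 1) by omega]

-- structure of expsOf: the head is the lowest set bit; clearing it (u &= u-1) drops it
theorem expsOf_step (n : Nat) (hn : 0 < n) :
    ∃ e rest, expsOf n = e :: rest ∧ 2 ^ e ≤ n ∧ n &&& (n - 1) = n - 2 ^ e ∧
      expsOf (n - 2 ^ e) = rest := by
  induction n using Nat.strong_induction_on with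
  | _ n ih =>
    by_cases hodd : n % 2 = 1
    · refine ⟨0, (expsOf (n / 2)).map (· + 1), ?_, by omega, ?_, ?_⟩
      · rw [expsOf]; simp [Nat.pos_iff_ne_zero.mp hn, hodd]
      · simpa using and_pred_odd n hodd
      · by_cases h1 : n = 1
        · subst h1; simp [expsOf_zero]
        · rw [show n - 2 ^ 0 = n - 1 by simp]
          rw [expsOf]
          simp only [show ¬(n - 1 = 0) by omega, dite_false]
          rw [show (n - 1) % 2 = 0 by omega]
          simp only [show ¬((0 : Nat) = 1) by omega, if_false]
          rw [show (n - 1) / 2 = n / 2 by omega]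
    · have hk : 0 < n / 2 := by omega
      have hlt : n / 2 < n := by omega
      obtain ⟨e', r', hE, hle, hand, hrest⟩ := ih (n / 2) hlt hk
      have hn2 : n = 2 * (n / 2) := by omega
      refine ⟨e' + 1, r'.map (· + 1), ?_, by rw [pow_succ]; omega, ?_, ?_⟩
      · rw [expsOf]
        simp only [Nat.pos_iff_ne_zero.mp hn, dite_false, hodd, if_false]
        rw [hE]; simp
      · calc n &&& (n - 1) = (2 * (n / 2)) &&& (2 * (n / 2) - 1) := by rw [← hn2]
          _ = 2 * ((n / 2) &&& (n / 2 - 1)) := and_pred_even _ hk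
          _ = 2 * (n / 2 - 2 ^ e') := by rw [hand]
          _ = n - 2 ^ (e' + 1) := by rw [pow_succ]; omega
      · have hm : n - 2 ^ (e' + 1) = 2 * (n / 2 - 2 ^ e') := by rw [pow_succ]; omega
        rw [hm]
        by_cases hz : n / 2 - 2 ^ e' = 0
        · rw [hz]
          have : r' = [] := by rw [← hrest, hz, expsOf_zero]
          simp [this, expsOf_zero]
        · rw [expsOf]
          simp only [show ¬(2 * (n / 2 - 2 ^ e') = 0) by omega, dite_false]
          rw [show (2 * (n / 2 - 2 ^ e')) % 2 = 0 by omega]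
          simp only [show ¬((0 : Nat) = 1) by omega, if_false]
          rw [show (2 * (n / 2 - 2 ^ e')) / 2 = n / 2 - 2 ^ e' by omega, hrest]

-- A's yielded list, expressed through partialSubs, is B's clear-lowest-bit iteration
theorem main_nat (n : Nat) :
    (n : Int) :: partialSubs (n : Int) ((expsOf n).map (fun e : Nat => (2 : Int) ^ e))
      = altGo n := by
  induction n using Nat.strong_induction_on with
  | _ n ih =>
    by_cases h : n = 0
    · subst h; rw [altGo]; simp [expsOf_zero, partialSubs]
    · obtain ⟨e, rest, hE, hle, hand, hrest⟩ := expsOf_step n (Nat.pos_of_ne_zero h)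
      have hm : n &&& (n - 1) < n :=
        Nat.lt_of_le_of_lt Nat.and_le_right (Nat.sub_lt (Nat.pos_of_ne_zero h) one_pos)
      have hcast : (n : Int) - (2 : Int) ^ e = ((n - 2 ^ e : Nat) : Int) := by
        push_cast [Nat.cast_sub hle]; ring
      rw [hE]
      simp only [List.map_cons, partialSubs]
      rw [hcast, ← hrest]
      rw [ih (n - 2 ^ e) (by rw [← hand]; exact hm)]
      conv_rhs => rw [altGo]
      rw [dif_neg h, hand]

-- ===== VERDICT (by name: the statement is the Claim_ definition above) =====
theorem uint2iter_low_bin_uintsBE_spec : Claim_equal_uint2iter_low_bin_uintsBE := by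
  intro u _ hpre
  have hu : (0 : Int) ≤ u := hpre
  unfold Spec_uint2iter_low_bin_uintsBE uint2iter_low_bin_uintsBE uint2iter_low_bin_uintsBE_alt
  rw [if_neg (by omega)]
  dsimp only
  rw [exps_eq u]
  have h1 := fold1 (expsOf u.toNat) 0 [] (expsOf_LB u.toNat)
  simp only [pow_zero, Nat.cast_zero] at h1
  rw [h1]
  rw [fold2]
  have := main_nat u.toNat
  rw [Int.toNat_of_nonneg hu] at this
  simpa using this
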